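-- pv_equiv track=rewrite | github.com/nervjack2/PropertyNeurons | tools.py | get_monophone_mid
-- ===== SOURCE A (Python) =====
-- def get_monophone_mid(phoneme):
--     pidx = []
--     pre_x = phoneme[0]
--     start_x = 0
--     for idx, x in enumerate(phoneme):
--         if x != pre_x:
--             end_x = idx-1
--             mid_x = (start_x + end_x) // 2
--             pidx.append(mid_x)
--             start_x = idx
--         pre_x = x
--     return pidx
-- ===== SOURCE B (Python) =====
-- def get_monophone_mid(phoneme):
--     # run-length encode the sequence, then derive midpoints arithmetically
--     runs = []
--     for x in phoneme:
--         if runs and runs[-1][0] == x: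
--             runs[-1][1] += 1
--         else:
--             runs.append([x, 1])
--     out = []
--     pos = 0
--     for _, n in runs[:-1]:
--         out.append(pos + (n - 1) // 2)
--         pos += n
--     return out
-- ===== Notes on version B (the rewrite author's own statement) =====
-- stated objective: alternative
-- what changed: Replaces A's change-point scan carrying (pidx, pre_x, start_x) by a run-length encoding: first build [symbol, count] runs, then compute each midpoint arithmetically as pos + (count-1)//2 while accumulating positions, skipping the last run.
import Mathlib
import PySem

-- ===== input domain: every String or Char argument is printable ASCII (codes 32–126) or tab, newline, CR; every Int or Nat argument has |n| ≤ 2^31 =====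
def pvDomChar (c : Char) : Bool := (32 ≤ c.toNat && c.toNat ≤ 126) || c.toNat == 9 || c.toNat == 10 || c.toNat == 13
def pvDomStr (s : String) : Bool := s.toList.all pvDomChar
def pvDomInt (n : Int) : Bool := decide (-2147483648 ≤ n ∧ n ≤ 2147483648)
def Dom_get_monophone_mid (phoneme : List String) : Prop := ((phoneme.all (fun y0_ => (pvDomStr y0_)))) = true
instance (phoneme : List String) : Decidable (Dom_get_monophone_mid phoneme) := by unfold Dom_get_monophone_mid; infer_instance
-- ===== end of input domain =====

-- B replaces A's change-point scan by run-length encoding plus arithmetic midpoints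
-- (objective: alternative algorithm, same return value).

-- ===== PORT A =====
def get_monophone_mid (phoneme : List String) : List Int :=
  match PySem.List.pyGet? phoneme 0 with
  | none => []   -- Python raises IndexError here (excluded by Pre_)
  | some p0 =>
    let st := (PySem.List.enumerate phoneme 0).foldl
      (fun (acc : List Int × String × Int) (p : Int × String) =>
        if p.2 ≠ acc.2.1 then
          (acc.1 ++ [PySem.Int.floordiv (acc.2.2 + (p.1 - 1)) 2], p.2, p.1)
        else (acc.1, p.2, acc.2.2))
      ([], p0, 0)
    st.1

-- ===== PORT B =====
def get_monophone_mid_alt (phoneme : List String) : List Int :=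
  let runs : List (String × Int) := phoneme.foldl
    (fun (runs : List (String × Int)) x =>
      match runs.getLast? with
      | some last =>
          if last.1 == x then runs.dropLast ++ [(last.1, last.2 + 1)]
          else runs ++ [(x, 1)]
      | none => runs ++ [(x, 1)])
    []
  let st := (PySem.List.slice runs none (some (-1))).foldl
    (fun (s : List Int × Int) (p : String × Int) =>
      (s.1 ++ [s.2 + PySem.Int.floordiv (p.2 - 1) 2], s.2 + p.2))
    ([], 0)
  st.1

-- ===== PRECONDITION & SPEC =====
-- Pre_ excludes exactly the empty list, on which Python A raises IndexError (phoneme[0]).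
def Pre_get_monophone_mid (phoneme : List String) : Prop := phoneme ≠ []
instance (phoneme : List String) : Decidable (Pre_get_monophone_mid phoneme) := by unfold Pre_get_monophone_mid; infer_instance
def pvWitness_get_monophone_mid : List String := ["a", "a", "b", "c", "c"]

def Spec_get_monophone_mid (phoneme : List String) (out : List Int) : Prop := out = get_monophone_mid_alt phoneme
instance (phoneme : List String) (out : List Int) : Decidable (Spec_get_monophone_mid phoneme out) := by unfold Spec_get_monophone_mid; infer_instance

-- ===== CLAIM (what is proved, stated in full; the proofs are below) =====
def Claim_equal_get_monophone_mid : Prop := ∀ (phoneme : List String), Dom_get_monophone_mid phoneme → Pre_get_monophone_mid phoneme → Spec_get_monophone_mid phoneme (get_monophone_mid phoneme)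

-- ===== LEMMAS AND PROOFS =====

-- Reference for A: midpoints of the runs of (pre-prefixed) l, current run started at
-- `start`, next index is `k`; the last run contributes nothing.
def pvMids (pre : String) (start k : Int) : List String → List Int
  | [] => []
  | x :: r =>
    if x ≠ pre then PySem.Int.floordiv (start + (k - 1)) 2 :: pvMids x k (k + 1) r
    else pvMids pre start (k + 1) r

-- Reference for B: run-length encoding of l given an open run (pre, cnt).
def pvRuns (pre : String) (cnt : Int) : List String → List (String × Int)
  | [] => [(pre, cnt)]
  | x :: r => if x = pre then pvRuns pre (cnt + 1) r else (pre, cnt) :: pvRuns x 1 r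

-- Reference for B's second loop, applied to runs.dropLast.
def pvOut (pos : Int) : List (String × Int) → List Int
  | [] => []
  | (_, n) :: r => (pos + PySem.Int.floordiv (n - 1) 2) :: pvOut (pos + n) r

theorem pvFoldA (l : List String) : ∀ (acc : List Int) (pre : String) (start k : Int),
    ((PySem.List.enumerate l k).foldl
      (fun (acc : List Int × String × Int) (p : Int × String) =>
        if p.2 ≠ acc.2.1 then
          (acc.1 ++ [PySem.Int.floordiv (acc.2.2 + (p.1 - 1)) 2], p.2, p.1)
        else (acc.1, p.2, acc.2.2))
      (acc, pre, start)).1 = acc ++ pvMids pre start k l := by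
  induction l with
  | nil => intro acc pre start k; simp [PySem.List.enumerate_nil, pvMids]
  | cons x r ih =>
    intro acc pre start k
    rw [PySem.List.enumerate_cons]
    simp only [List.foldl_cons]
    by_cases h : x = pre
    · subst h
      rw [if_neg (by simp), pvMids, if_neg (by simp)]
      exact ih acc x start (k + 1)
    · rw [if_pos (by simpa using h), pvMids, if_pos (by simpa using h), ih]
      simp

theorem pvRuns_ne_nil (l : List String) : ∀ pre cnt, pvRuns pre cnt l ≠ [] := by
  induction l with
  | nil => intro pre cnt; simp [pvRuns]
  | cons x r ih =>
    intro pre cnt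
    rw [pvRuns]
    split_ifs with h
    · exact ih pre (cnt + 1)
    · simp

theorem pvFoldRuns (l : List String) : ∀ (acc : List (String × Int)) (pre : String) (cnt : Int),
    l.foldl
      (fun (runs : List (String × Int)) x =>
        match runs.getLast? with
        | some last =>
            if last.1 == x then runs.dropLast ++ [(last.1, last.2 + 1)]
            else runs ++ [(x, 1)]
        | none => runs ++ [(x, 1)])
      (acc ++ [(pre, cnt)]) = acc ++ pvRuns pre cnt l := by
  induction l with
  | nil => intro acc pre cnt; simp [pvRuns]
  | cons x r ih =>
    intro acc pre cnt
    simp only [List.foldl_cons, List.getLast?_append, List.getLast?_singleton, Option.some_or, List.dropLast_concat]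
    by_cases h : pre = x
    · subst h
      rw [if_pos (by simp), pvRuns, if_pos rfl]
      exact ih acc pre (cnt + 1)
    · rw [if_neg (by simpa using h), pvRuns, if_neg (fun hx => h hx.symm)]
      rw [List.append_assoc]
      have := ih (acc ++ [(pre, cnt)]) x 1
      simpa using this
-- floordiv (2a + b) 2 = a + floordiv b 2
theorem pvFdivShift (a b : Int) :
    PySem.Int.floordiv (a + (a + b)) 2 = a + PySem.Int.floordiv b 2 := by
  show (a + (a + b)).fdiv 2 = a + b.fdiv 2
  rw [Int.fdiv_eq_ediv, Int.fdiv_eq_ediv]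
  simp only [show ((0:Int) ≤ 2 ∨ (2:Int) ∣ a + (a + b)) from Or.inl (by norm_num),
    show ((0:Int) ≤ 2 ∨ (2:Int) ∣ b) from Or.inl (by norm_num), if_pos]
  omega

theorem pvOutMids (l : List String) : ∀ (pre : String) (cnt start : Int),
    pvOut start ((pvRuns pre cnt l).dropLast) = pvMids pre start (start + cnt) l := by
  induction l with
  | nil => intro pre cnt start; simp [pvRuns, pvMids, pvOut]
  | cons x r ih =>
    intro pre cnt start
    rw [pvRuns, pvMids]
    by_cases h : x = pre
    · rw [if_pos h, if_neg (by simpa using h)]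
      rw [ih pre (cnt + 1) start]
      ring_nf
    · rw [if_neg h, if_pos (by simpa using h)]
      rw [List.dropLast_cons_of_ne_nil (pvRuns_ne_nil r x 1), pvOut]
      rw [ih x 1 (start + cnt)]
      congr 1
      rw [show start + (start + cnt - 1) = start + (start + (cnt - 1)) by ring,
        pvFdivShift]

theorem pvFoldOut (rs : List (String × Int)) : ∀ (acc : List Int) (pos : Int),
    (rs.foldl
      (fun (s : List Int × Int) (p : String × Int) =>
        (s.1 ++ [s.2 + PySem.Int.floordiv (p.2 - 1) 2], s.2 + p.2))
      (acc, pos)).1 = acc ++ pvOut pos rs := by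
  induction rs with
  | nil => intro acc pos; simp [pvOut]
  | cons p r ih =>
    intro acc pos
    simp only [List.foldl_cons]
    rw [ih, pvOut]
    simp

-- ===== VERDICT (by name: the statement is the Claim_ definition above) =====
theorem get_monophone_mid_spec : Claim_equal_get_monophone_mid := by
  intro phoneme _ hpre
  unfold Spec_get_monophone_mid
  match phoneme, hpre with
  | p0 :: rest, _ =>
    unfold get_monophone_mid get_monophone_mid_alt
    rw [show PySem.List.pyGet? (p0 :: rest) 0 = some p0 from by
      simp [PySem.List.pyGet?, PySem.List.pyIdx?]]
    rw [PySem.List.enumerate_cons]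
    simp only [List.foldl_cons]
    rw [if_neg (show ¬(p0 ≠ p0) by simp), pvFoldA]
    rw [show (match ([] : List (String × Int)).getLast? with
        | some last => if (last.1 == p0) = true then List.dropLast [] ++ [(last.1, last.2 + 1)] else [] ++ [(p0, 1)]
        | none => [] ++ [(p0, 1)]) = [(p0, 1)] from rfl]
    have hr := pvFoldRuns rest [] p0 1
    simp only [List.nil_append] at hr
    rw [hr, PySem.List.slice_to_neg_one, pvFoldOut]
    rw [pvOutMids]
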